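-- pv_equiv track=rewrite | github.com/itxprashant/ctf-toolkit | bruteforce/wordlist_gen.py | generate_from_pattern
-- ===== SOURCE A (Python) =====
-- import itertools
-- import string
--
-- def generate_from_pattern(pattern):
--     """
--     Generate words from a pattern with placeholders:
--       # = digit (0-9)
--       ? = lowercase letter
--       ^ = uppercase letter
--       * = alphanumeric
--       Literal characters are kept as-is
--     """
--     placeholder_map = {
--         '#': string.digits,
--         '?': string.ascii_lowercase,
--         '^': string.ascii_uppercase,
--         '*': string.ascii_letters + string.digits,
--     }
--
--     positions = []
--     for ch in pattern:
--         if ch in placeholder_map: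
--             positions.append(placeholder_map[ch])
--         else:
--             positions.append(ch)
--
--     # Calculate total combinations
--     total = 1
--     for p in positions:
--         total *= len(p)
--
--     for combo in itertools.product(*positions):
--         yield ''.join(combo)
-- ===== SOURCE B (Python) =====
-- import string
--
-- def generate_from_pattern(pattern):
--     """Meet-in-the-middle rank decoding: split the positions in two halves, unrank
--     every index of each half into its word via mixed-radix suffix products, then
--     yield every head+tail concatenation."""
--     placeholder_map = {
--         '#': string.digits,
--         '?': string.ascii_lowercase,
--         '^': string.ascii_uppercase,
--         '*': string.ascii_letters + string.digits,
--     }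
--     positions = [placeholder_map.get(ch, ch) for ch in pattern]
--     m = len(positions) // 2
--     heads = _unrank_all(positions[:m])
--     tails = _unrank_all(positions[m:])
--     for h in heads:
--         yield from map(h.__add__, tails)
--
-- def _unrank_all(ps):
--     """All words of the sub-pattern ps, in order: word k's char j is ps[j][(k // suffix[j+1]) % len(ps[j])]."""
--     n = len(ps)
--     suffix = [1] * (n + 1)
--     for j in range(n - 1, -1, -1):
--         suffix[j] = suffix[j + 1] * len(ps[j])
--     cols = [(p, suffix[j + 1], len(p)) for j, p in enumerate(ps)]
--     return [''.join([p[(k // s) % L] for p, s, L in cols]) for k in range(suffix[0])]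
-- ===== Notes on version B (the rewrite author's own statement) =====
-- stated objective: alternative
-- what changed: Replaces itertools.product's incremental tuple enumeration with meet-in-the-middle rank decoding: the positions are split into two halves, every rank of each half is unranked in mixed radix via suffix products into a word, and all head+tail concatenations are emitted.
import Mathlib
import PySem

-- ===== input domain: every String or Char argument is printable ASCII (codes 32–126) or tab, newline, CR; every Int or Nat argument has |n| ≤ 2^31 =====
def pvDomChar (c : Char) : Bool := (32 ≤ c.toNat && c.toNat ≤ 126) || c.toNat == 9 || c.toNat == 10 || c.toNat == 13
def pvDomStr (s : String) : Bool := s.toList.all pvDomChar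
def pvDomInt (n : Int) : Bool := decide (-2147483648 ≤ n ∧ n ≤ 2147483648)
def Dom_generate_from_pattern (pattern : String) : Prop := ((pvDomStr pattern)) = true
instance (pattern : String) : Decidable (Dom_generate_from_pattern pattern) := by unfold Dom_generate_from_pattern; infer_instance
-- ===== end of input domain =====

-- B replaces the itertools.product enumeration by meet-in-the-middle rank decoding:
-- each half of the positions is unranked via mixed-radix suffix products, then all
-- head+tail concatenations are emitted; alternative decomposition.
-- A is a Python generator; both ports return the full list of yielded strings.

-- ===== PORT A =====
-- placeholder_map literal
def pmapA : PySem.Dict Char String :=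
  PySem.Dict.mk [('#', "0123456789"), ('?', "abcdefghijklmnopqrstuvwxyz"),
                 ('^', "ABCDEFGHIJKLMNOPQRSTUVWXYZ"),
                 ('*', "abcdefghijklmnopqrstuvwxyzABCDEFGHIJKLMNOPQRSTUVWXYZ0123456789")]

def generate_from_pattern (pattern : String) : List String :=
  -- positions loop: placeholder expansion or the literal char as a 1-char string
  let positions : List String :=
    pattern.toList.foldl (fun acc ch =>
      match pmapA.get? ch with
      | some s => acc ++ [s]
      | none   => acc ++ [String.ofList [ch]]) []
  -- total combinations (computed by A, never used)
  let _total : Nat := positions.foldl (fun a p => a * p.toList.length) 1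
  -- itertools.product(*positions), leftmost slowest; ''.join(combo)
  let combos : List (List Char) :=
    positions.foldl (fun acc p => acc.flatMap (fun pre => p.toList.map (fun c => pre ++ [c]))) [[]]
  combos.map (fun l => String.ofList l)

-- ===== PORT B =====
def pmapB : PySem.Dict Char String :=
  PySem.Dict.mk [('#', "0123456789"), ('?', "abcdefghijklmnopqrstuvwxyz"),
                 ('^', "ABCDEFGHIJKLMNOPQRSTUVWXYZ"),
                 ('*', "abcdefghijklmnopqrstuvwxyzABCDEFGHIJKLMNOPQRSTUVWXYZ0123456789")]

-- suffix[j] of Source B: product of the lengths of the positions from j on (computed right-to-left)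
def sufProdB (ps : List (List Char)) : Nat := ps.foldr (fun p a => p.length * a) 1

-- the j-loop of Source B's join: char j of word k is positions[j][(k // suffix[j+1]) % len(positions[j])]
def decodeB (ps : List (List Char)) (k : Nat) : List Char :=
  match ps with
  | [] => []
  | p :: rest => p.getD ((k / sufProdB rest) % p.length) ' ' :: decodeB rest k

-- _unrank_all of Source B: all words of the sub-pattern, word k decoded from rank k
def unrankAllB (ps : List (List Char)) : List (List Char) :=
  (List.range (sufProdB ps)).map (fun k => decodeB ps k)

def generate_from_pattern_alt (pattern : String) : List String :=
  -- positions comprehension (strings iterated as their character lists)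
  let positions : List (List Char) :=
    pattern.toList.map (fun ch => (pmapB.getD ch (String.ofList [ch])).toList)
  let m := positions.length / 2
  (unrankAllB (positions.take m)).flatMap (fun h =>
    (unrankAllB (positions.drop m)).map (fun t => String.ofList (h ++ t)))

-- ===== PRECONDITION & SPEC =====
def Spec_generate_from_pattern (pattern : String) (out : List String) : Prop := out = generate_from_pattern_alt pattern
instance (pattern : String) (out : List String) : Decidable (Spec_generate_from_pattern pattern out) := by unfold Spec_generate_from_pattern; infer_instance

-- ===== CLAIM (what is proved, stated in full; the proofs are below) =====
def Claim_equal_generate_from_pattern : Prop := ∀ (pattern : String), Dom_generate_from_pattern pattern → Spec_generate_from_pattern pattern (generate_from_pattern pattern)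

-- ===== LEMMAS AND PROOFS =====

-- structural cartesian product (leftmost slowest)
def prodR : List (List Char) → List (List Char)
  | [] => [[]]
  | p :: ps => p.flatMap (fun c => (prodR ps).map (fun t => c :: t))

-- A's per-char expansion equals B's
theorem expA_eq_expB (ch : Char) :
    (match pmapA.get? ch with
     | some s => s
     | none   => String.ofList [ch]) = pmapB.getD ch (String.ofList [ch]) := by
  have h : pmapA = pmapB := rfl
  rw [h, PySem.Dict.getD_eq_get?_getD]
  cases pmapB.get? ch <;> rfl

-- every position is a nonempty character list
theorem expB_ne_nil (ch : Char) : (pmapB.getD ch (String.ofList [ch])).toList ≠ [] := by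
  rw [PySem.Dict.getD_eq_get?_getD]
  cases h : pmapB.get? ch with
  | none => simp
  | some s =>
    have hm := PySem.Dict.mem_items_of_get?_eq_some pmapB h
    have : pmapB.items = [('#', "0123456789"), ('?', "abcdefghijklmnopqrstuvwxyz"),
                 ('^', "ABCDEFGHIJKLMNOPQRSTUVWXYZ"),
                 ('*', "abcdefghijklmnopqrstuvwxyzABCDEFGHIJKLMNOPQRSTUVWXYZ0123456789")] := rfl
    rw [this] at hm
    simp only [List.mem_cons, List.not_mem_nil, or_false] at hm
    rcases hm with h1 | h1 | h1 | h1 <;> (injection h1 with _ h2; subst h2; simp)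

theorem sufProdB_pos (ps : List (List Char)) (h : ∀ p ∈ ps, p ≠ []) : 0 < sufProdB ps := by
  induction ps with
  | nil => decide
  | cons p ps ih =>
    have hp : p ≠ [] := h p (by simp)
    have : 0 < p.length := List.length_pos_iff.mpr hp
    have := ih (fun q hq => h q (by simp [hq]))
    simp only [sufProdB, List.foldr_cons] at *
    exact Nat.mul_pos ‹0 < p.length› this

-- decoding ignores multiples of the suffix product
theorem decodeB_add_mul (ps : List (List Char)) (h : ∀ p ∈ ps, p ≠ []) :
    ∀ (r m : Nat), decodeB ps (r + m * sufProdB ps) = decodeB ps r := by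
  induction ps with
  | nil => intro r m; rfl
  | cons p ps ih =>
    intro r m
    have hT : 0 < sufProdB ps := sufProdB_pos ps (fun q hq => h q (by simp [hq]))
    have hsp : sufProdB (p :: ps) = p.length * sufProdB ps := rfl
    simp only [decodeB, hsp]
    congr 1
    · congr 1
      rw [show m * (p.length * sufProdB ps) = (m * p.length) * sufProdB ps by ring,
          Nat.add_mul_div_right _ _ hT, Nat.add_mul_mod_self_right]
    · rw [show m * (p.length * sufProdB ps) = (m * p.length) * sufProdB ps by ring]
      exact ih (fun q hq => h q (by simp [hq])) r (m * p.length)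

theorem range_mul_flatMap (a b : Nat) :
    List.range (a * b) = (List.range a).flatMap (fun q => (List.range b).map (fun r => q * b + r)) := by
  induction a with
  | zero => simp
  | succ a ih =>
    rw [Nat.succ_mul, List.range_add, ih, List.range_succ, List.flatMap_append]
    simp

theorem map_getD_range (p : List Char) (d : Char) :
    (List.range p.length).map (fun q => p.getD q d) = p := by
  apply List.ext_getElem
  · simp
  · intro i h1 h2
    simp [List.getD_eq_getElem?_getD, List.getElem?_eq_getElem h2]

-- prodR equals rank decoding
theorem prodR_eq_decode (ps : List (List Char)) (h : ∀ p ∈ ps, p ≠ []) :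
    prodR ps = (List.range (sufProdB ps)).map (decodeB ps) := by
  induction ps with
  | nil => rfl
  | cons p ps ih =>
    have hT : 0 < sufProdB ps := sufProdB_pos ps (fun q hq => h q (by simp [hq]))
    have hIH := ih (fun q hq => h q (by simp [hq]))
    have hsp : sufProdB (p :: ps) = p.length * sufProdB ps := rfl
    rw [hsp, range_mul_flatMap, List.map_flatMap]
    show p.flatMap (fun c => (prodR ps).map (fun t => c :: t)) = _
    rw [hIH]
    conv_lhs => rw [← map_getD_range p ' ']
    rw [List.flatMap_map]
    apply List.flatMap_congr
    intro q hq
    rw [List.mem_range] at hq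
    rw [List.map_map, List.map_map]
    apply List.map_congr_left
    intro r hr
    rw [List.mem_range] at hr
    simp only [Function.comp_apply, decodeB]
    have h1 : (q * sufProdB ps + r) / sufProdB ps = q := by
      rw [mul_comm, Nat.mul_add_div hT, Nat.div_eq_of_lt hr, Nat.add_zero]
    congr 1
    · rw [h1, Nat.mod_eq_of_lt hq]
    · rw [show q * sufProdB ps + r = r + q * sufProdB ps by ring]
      exact (decodeB_add_mul ps (fun q hq => h q (by simp [hq])) r q).symm

-- the product splits at any point into head/tail concatenations
theorem prodR_append (xs ys : List (List Char)) :
    prodR (xs ++ ys) = (prodR xs).flatMap (fun h => (prodR ys).map (fun t => h ++ t)) := by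
  induction xs with
  | nil => simp [prodR]
  | cons p xs ih =>
    simp only [List.cons_append, prodR, ih, List.flatMap_assoc, List.map_flatMap,
      List.flatMap_map, List.map_map]
    apply List.flatMap_congr
    intro c _
    apply List.flatMap_congr
    intro h _
    apply List.map_congr_left
    intro t _
    simp

-- A's foldl product in terms of prodR
theorem foldl_prod_eq (ps : List (List Char)) :
    ∀ acc : List (List Char),
      ps.foldl (fun acc p => acc.flatMap (fun pre => p.map (fun c => pre ++ [c]))) acc
        = acc.flatMap (fun pre => (prodR ps).map (fun t => pre ++ t)) := by
  induction ps with
  | nil => intro acc; simp [prodR]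
  | cons p ps ih =>
    intro acc
    rw [List.foldl_cons, ih]
    simp only [prodR, List.flatMap_assoc, List.flatMap_map, List.map_flatMap, List.map_map]
    apply List.flatMap_congr
    intro pre _
    apply List.flatMap_congr
    intro c _
    apply List.map_congr_left
    intro t _
    simp [List.append_assoc]

-- pushing String.toList through A's product fold
theorem foldlA_eq (l : List String) (acc : List (List Char)) :
    l.foldl (fun acc p => acc.flatMap (fun pre => p.toList.map (fun c => pre ++ [c]))) acc
      = (l.map String.toList).foldl (fun acc p => acc.flatMap (fun pre => p.map (fun c => pre ++ [c]))) acc := by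
  induction l generalizing acc with
  | nil => rfl
  | cons p l ih => simp only [List.foldl_cons, List.map_cons, ih]

-- A's positions (as char lists) are B's positions
theorem positions_eq (l : List Char) :
    (l.foldl (fun acc ch =>
        match pmapA.get? ch with
        | some s => acc ++ [s]
        | none   => acc ++ [String.ofList [ch]]) []).map String.toList
      = l.map (fun ch => (pmapB.getD ch (String.ofList [ch])).toList) := by
  have h : ∀ acc : List String,
      (l.foldl (fun acc ch =>
        match pmapA.get? ch with
        | some s => acc ++ [s]
        | none   => acc ++ [String.ofList [ch]]) acc)
      = acc ++ l.map (fun ch => pmapB.getD ch (String.ofList [ch])) := by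
    induction l with
    | nil => intro acc; simp
    | cons ch l ih =>
      intro acc
      rw [List.foldl_cons, ih]
      rw [show (match pmapA.get? ch with
            | some s => acc ++ [s]
            | none   => acc ++ [String.ofList [ch]])
          = acc ++ [pmapB.getD ch (String.ofList [ch])] by
        rw [← expA_eq_expB ch]; cases pmapA.get? ch <;> rfl]
      simp
  rw [h []]
  simp [List.map_map]

-- ===== VERDICT (by name: the statement is the Claim_ definition above) =====
theorem generate_from_pattern_spec : Claim_equal_generate_from_pattern := by
  intro pattern _
  show generate_from_pattern pattern = generate_from_pattern_alt pattern
  have hA : generate_from_pattern pattern =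
      ((pattern.toList.foldl (fun acc ch =>
          match pmapA.get? ch with
          | some s => acc ++ [s]
          | none   => acc ++ [String.ofList [ch]]) []).foldl
        (fun acc p => acc.flatMap (fun pre => p.toList.map (fun c => pre ++ [c]))) [[]]).map String.ofList := rfl
  set psB := pattern.toList.map (fun ch => (pmapB.getD ch (String.ofList [ch])).toList) with hpsB
  have hB : generate_from_pattern_alt pattern =
      (unrankAllB (psB.take (psB.length / 2))).flatMap (fun h =>
        (unrankAllB (psB.drop (psB.length / 2))).map (fun t => String.ofList (h ++ t))) := rfl
  rw [hA, hB]
  have hne : ∀ p ∈ psB, p ≠ [] := by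
    intro p hp
    rw [hpsB, List.mem_map] at hp
    obtain ⟨ch, _, rfl⟩ := hp
    exact expB_ne_nil ch
  rw [foldlA_eq, positions_eq, ← hpsB, foldl_prod_eq]
  rw [show unrankAllB (psB.take (psB.length / 2)) = prodR (psB.take (psB.length / 2)) from
        (prodR_eq_decode _ (fun p hp => hne p (List.mem_of_mem_take hp))).symm,
      show unrankAllB (psB.drop (psB.length / 2)) = prodR (psB.drop (psB.length / 2)) from
        (prodR_eq_decode _ (fun p hp => hne p (List.mem_of_mem_drop hp))).symm,
]
  have hL : List.flatMap (fun pre => List.map (fun t => pre ++ t) (prodR psB)) [[]] = prodR psB := by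
    simp
  rw [hL]
  conv_lhs => rw [← List.take_append_drop (psB.length / 2) psB]
  rw [prodR_append, List.map_flatMap]
  apply List.flatMap_congr
  intro h _
  rw [List.map_map]
  apply List.map_congr_left
  intro t _
  simp
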